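-- pv_equiv track=rewrite | github.com/AytugUlubay/codeWarsPython | kyu7/Disorganised page lists.py | find_page_number
-- ===== SOURCE A (Python) =====
-- def find_page_number(pages):
--     i=0
--     k=[]
--     while i<len(pages):
--         if i+1!=pages[i]:
--             k.append(pages[i])
--             pages.remove(pages[i])
--             i-=1
--         i+=1
--     return(k)
-- ===== SOURCE B (Python) =====
-- def find_page_number(pages):
--     out = []
--     expected = 1
--     for p in pages:
--         if p == expected:
--             expected += 1
--         else:
--             out.append(p)
--     return out
-- ===== Notes on version B (the rewrite author's own statement) =====
-- stated objective: faster
-- what changed: Replaces A's while-loop that mutates the list in place (pages.remove plus index rollback) by a single non-mutating pass that keeps a running 'expected' counter and collects mismatching pages.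
import Mathlib
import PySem

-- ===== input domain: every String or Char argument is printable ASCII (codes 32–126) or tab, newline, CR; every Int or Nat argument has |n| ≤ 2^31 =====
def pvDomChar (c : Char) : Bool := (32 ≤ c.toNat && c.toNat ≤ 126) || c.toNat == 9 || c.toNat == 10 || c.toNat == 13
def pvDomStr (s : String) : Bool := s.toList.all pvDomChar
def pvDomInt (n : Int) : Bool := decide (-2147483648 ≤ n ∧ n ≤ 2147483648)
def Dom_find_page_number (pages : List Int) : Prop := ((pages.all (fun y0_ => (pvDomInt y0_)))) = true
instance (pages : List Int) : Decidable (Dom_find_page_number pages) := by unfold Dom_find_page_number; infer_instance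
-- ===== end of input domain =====

-- B replaces A's scan-with-removal by a single pass with a running 'expected' counter
-- (A mutates its argument in place via pages.remove, B does not — what is proved here is equality of the return values).

-- ===== PORT A =====
-- used by the port's termination proof (a removal shortens the list by one)
theorem pv_remove?_length {xs ps : List Int} {v : Int}
    (h : PySem.List.remove? xs v = some ps) : ps.length + 1 = xs.length := by
  have hv : v ∈ xs := by
    by_contra hnv
    rw [(PySem.List.remove?_eq_none_iff xs v).mpr hnv] at h
    simp at h
  rw [PySem.List.remove?_eq_some_erase xs v hv, Option.some.injEq] at h
  subst h
  have h1 := List.length_erase_of_mem hv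
  have h2 := List.length_pos_of_mem hv
  omega

-- the while loop of A; Python's `i -= 1; i += 1` after a removal nets to i unchanged,
-- so i stays ≥ 0 and is carried as a Nat
def findPNLoop (pages : List Int) (i : Nat) (k : List Int) : List Int :=
  if _h : (i : Int) < pages.length then
    match PySem.List.pyGet? pages (i : Int) with
    | none => k   -- unreachable: 0 ≤ i < len(pages)
    | some v =>
      if (i : Int) + 1 ≠ v then
        match hr : PySem.List.remove? pages v with
        | none => k ++ [v]   -- unreachable: v = pages[i] ∈ pages
        | some ps => findPNLoop ps i (k ++ [v])
      else
        findPNLoop pages (i + 1) k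
  else k
termination_by pages.length - i
decreasing_by
  · have := pv_remove?_length hr; omega
  · omega

def find_page_number (pages : List Int) : List Int :=
  findPNLoop pages 0 []

-- ===== PORT B =====
-- Source B's for loop: two accumulators, `expected` and `out`
def altGo (rest : List Int) (expected : Int) (out : List Int) : List Int :=
  match rest with
  | [] => out
  | p :: ps => if p = expected then altGo ps (expected + 1) out else altGo ps expected (out ++ [p])

def find_page_number_alt (pages : List Int) : List Int :=
  altGo pages 1 []

-- ===== PRECONDITION & SPEC =====
def Spec_find_page_number (pages : List Int) (out : List Int) : Prop := out = find_page_number_alt pages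
instance (pages : List Int) (out : List Int) : Decidable (Spec_find_page_number pages out) := by unfold Spec_find_page_number; infer_instance

-- ===== CLAIM (what is proved, stated in full; the proofs are below) =====
def Claim_equal_find_page_number : Prop := ∀ (pages : List Int), Dom_find_page_number pages → Spec_find_page_number pages (find_page_number pages)

-- ===== LEMMAS AND PROOFS =====

-- erasing the first occurrence of xs[i] (which sits at some index ≤ i) and then dropping i
-- elements is the same as dropping i+1 elements of the original list
theorem pv_erase_drop (xs : List Int) (i : Nat) (v : Int)
    (hi : i < xs.length) (hv : xs[i] = v) : (xs.erase v).drop i = xs.drop (i + 1) := by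
  induction xs generalizing i with
  | nil => simp at hi
  | cons x t ih =>
    cases i with
    | zero =>
      simp at hv
      subst hv
      simp [List.erase_cons_head]
    | succ j =>
      by_cases hx : x = v
      · subst hx
        simp [List.erase_cons_head, List.drop_succ_cons]
      · rw [List.erase_cons_tail (by simpa using hx)]
        simp only [List.drop_succ_cons]
        exact ih j (by simpa using hi) (by simpa using hv)

-- loop invariant: A's loop on (pages, i) behaves like B's loop on pages.drop i with expected = i+1
theorem pv_loop_eq (n : Nat) : ∀ (pages : List Int) (i : Nat) (k : List Int),
    pages.length - i = n → findPNLoop pages i k = altGo (pages.drop i) ((i : Int) + 1) k := by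
  induction n with
  | zero =>
    intro pages i k hn
    rw [findPNLoop, dif_neg (by omega), List.drop_eq_nil_of_le (by omega), altGo]
  | succ m ih =>
    intro pages i k hn
    have hi : i < pages.length := by omega
    have hdrop : pages.drop i = pages[i] :: pages.drop (i + 1) :=
      (List.getElem_cons_drop hi).symm
    rw [findPNLoop, dif_pos (by exact_mod_cast hi),
        PySem.List.pyGet?_natCast, List.getElem?_eq_getElem hi]
    simp only
    rw [hdrop, altGo]
    by_cases hc : (i : Int) + 1 = pages[i]
    · rw [if_neg (by simpa using hc), if_pos hc.symm]
      rw [ih pages (i + 1) k (by omega)]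
      push_cast
      ring_nf
    · rw [if_pos hc, if_neg (fun h => hc h.symm)]
      have hmem : pages[i] ∈ pages := List.getElem_mem hi
      rw [PySem.List.remove?_eq_some_erase pages pages[i] hmem]
      simp only
      have hlen := List.length_erase_of_mem hmem
      rw [ih (pages.erase pages[i]) i (k ++ [pages[i]]) (by omega),
          pv_erase_drop pages i pages[i] hi rfl]

-- ===== VERDICT (by name: the statement is the Claim_ definition above) =====
theorem find_page_number_spec : Claim_equal_find_page_number := by
  intro pages _
  unfold Spec_find_page_number find_page_number find_page_number_alt
  have := pv_loop_eq (pages.length) pages 0 [] (by omega)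
  simpa using this
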